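-- pv_equiv track=rewrite | github.com/VladSkopenko/LeetCode | Count_numbers_of_team.py | numTeams
-- ===== SOURCE A (Python) =====
-- from typing import List
--
-- def numTeams(rating: List[int]) -> int:
--     n = len(rating)
--     count = 0
--
--     for j in range(1, n - 1):
--         left_less = left_more = right_less = right_more = 0
--
--         for i in range(j):
--             if rating[i] < rating[j]:
--                 left_less += 1
--             if rating[i] > rating[j]:
--                 left_more += 1
--
--         for k in range(j + 1, n):
--             if rating[k] < rating[j]:
--                 right_less += 1
--             if rating[k] > rating[j]:
--                 right_more += 1
--
--         count += left_less * right_more + left_more * right_less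
--
--     return count
-- ===== SOURCE B (Python) =====
-- from typing import List
--
-- def numTeams(rating: List[int]) -> int:
--     # DP on the last two members: precompute, for each j, how many indices i < j
--     # have rating[i] < rating[j] (and >); then every pair (j, k) with j < k that
--     # continues the trend contributes that precomputed count of valid first members.
--     n = len(rating)
--     pre = []
--     for j in range(n):
--         a = d = 0
--         for i in range(j):
--             if rating[i] < rating[j]:
--                 a += 1
--             elif rating[i] > rating[j]:
--                 d += 1
--         pre.append((a, d))
--     total = 0
--     for j in range(n):
--         for k in range(j + 1, n):
--             if rating[j] < rating[k]:
--                 total += pre[j][0]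
--             elif rating[j] > rating[k]:
--                 total += pre[j][1]
--     return total
-- ===== Notes on version B (the rewrite author's own statement) =====
-- stated objective: alternative
-- what changed: A pivots on the middle element and multiplies four side counts per pivot; B is a DP on the last two members: one pass builds a table of smaller/larger-to-the-left counts, a second pass over ordered pairs (j,k) accumulates the precomputed count of valid first members.
import Mathlib
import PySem

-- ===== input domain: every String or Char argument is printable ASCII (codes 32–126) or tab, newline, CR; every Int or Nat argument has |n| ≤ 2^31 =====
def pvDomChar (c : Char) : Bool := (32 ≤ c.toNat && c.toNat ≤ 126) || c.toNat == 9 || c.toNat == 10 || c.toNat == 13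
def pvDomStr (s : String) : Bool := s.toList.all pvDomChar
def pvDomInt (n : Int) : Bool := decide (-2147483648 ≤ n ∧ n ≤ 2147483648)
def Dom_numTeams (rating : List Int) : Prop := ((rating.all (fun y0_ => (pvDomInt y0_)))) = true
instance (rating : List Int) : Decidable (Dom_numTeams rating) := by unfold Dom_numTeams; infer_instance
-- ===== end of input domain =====

-- B replaces A's middle-pivot product of side counts by a two-phase DP on the last
-- two members of a team (precomputed left counts, then a pair scan): alternative
-- decomposition, same asymptotic cost.


-- ===== PORT A =====
def numTeams (rating : List Int) : Int :=
  let n : Int := PySem.List.len rating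
  (PySem.List.pyRange 1 (n - 1) 1).foldl (fun count j =>
    let lp : Int × Int := (PySem.List.pyRange 0 j 1).foldl (fun (p : Int × Int) i =>
      let p := if PySem.List.pyGetD rating i 0 < PySem.List.pyGetD rating j 0 then (p.1 + 1, p.2) else p
      if PySem.List.pyGetD rating i 0 > PySem.List.pyGetD rating j 0 then (p.1, p.2 + 1) else p) (0, 0)
    let rp : Int × Int := (PySem.List.pyRange (j + 1) n 1).foldl (fun (p : Int × Int) k =>
      let p := if PySem.List.pyGetD rating k 0 < PySem.List.pyGetD rating j 0 then (p.1 + 1, p.2) else p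
      if PySem.List.pyGetD rating k 0 > PySem.List.pyGetD rating j 0 then (p.1, p.2 + 1) else p) (0, 0)
    count + lp.1 * rp.2 + lp.2 * rp.1) 0

-- ===== PORT B =====
def numTeams_alt (rating : List Int) : Int :=
  let n : Int := PySem.List.len rating
  let pre : List (Int × Int) := (PySem.List.pyRange 0 n 1).foldl (fun acc j =>
    acc ++ [(PySem.List.pyRange 0 j 1).foldl (fun (p : Int × Int) i =>
      if PySem.List.pyGetD rating i 0 < PySem.List.pyGetD rating j 0 then (p.1 + 1, p.2)
      else if PySem.List.pyGetD rating i 0 > PySem.List.pyGetD rating j 0 then (p.1, p.2 + 1)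
      else p) (0, 0)]) []
  (PySem.List.pyRange 0 n 1).foldl (fun total j =>
    (PySem.List.pyRange (j + 1) n 1).foldl (fun total k =>
      if PySem.List.pyGetD rating j 0 < PySem.List.pyGetD rating k 0 then
        total + (PySem.List.pyGetD pre j (0, 0)).1
      else if PySem.List.pyGetD rating j 0 > PySem.List.pyGetD rating k 0 then
        total + (PySem.List.pyGetD pre j (0, 0)).2
      else total) total) 0

-- ===== PRECONDITION & SPEC =====
def Spec_numTeams (rating : List Int) (out : Int) : Prop := out = numTeams_alt rating
instance (rating : List Int) (out : Int) : Decidable (Spec_numTeams rating out) := by unfold Spec_numTeams; infer_instance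

-- ===== CLAIM (what is proved, stated in full; the proofs are below) =====
def Claim_equal_numTeams : Prop := ∀ (rating : List Int), Dom_numTeams rating → Spec_numTeams rating (numTeams rating)

-- ===== LEMMAS AND PROOFS =====

-- the per-pivot contribution: (#left smaller)·(#right larger) + (#left larger)·(#right smaller)
def pvF (rating : List Int) (j : Int) : Int :=
  let x := PySem.List.pyGetD rating j 0
  let ysL := (PySem.List.pyRange 0 j 1).map (fun i => PySem.List.pyGetD rating i 0)
  let ysR := (PySem.List.pyRange (j + 1) (PySem.List.len rating) 1).map (fun k => PySem.List.pyGetD rating k 0)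
  (ysL.countP (fun y => decide (y < x)) : Int) * (ysR.countP (fun y => decide (x < y)) : Int)
  + (ysL.countP (fun y => decide (x < y)) : Int) * (ysR.countP (fun y => decide (y < x)) : Int)

-- A's two-independent-ifs pair counter
theorem pvPairFoldA (rating : List Int) (x : Int) : ∀ (r : List Int) (l m : Int),
    r.foldl (fun (p : Int × Int) i =>
      let p := if PySem.List.pyGetD rating i 0 < x then (p.1 + 1, p.2) else p
      if PySem.List.pyGetD rating i 0 > x then (p.1, p.2 + 1) else p) (l, m)
    = (l + ((r.map (fun i => PySem.List.pyGetD rating i 0)).countP (fun y => decide (y < x)) : Int),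
       m + ((r.map (fun i => PySem.List.pyGetD rating i 0)).countP (fun y => decide (x < y)) : Int)) := by
  intro r
  induction r with
  | nil => intro l m; simp
  | cons i t ih =>
    intro l m
    by_cases h1 : PySem.List.pyGetD rating i 0 < x <;>
      by_cases h2 : x < PySem.List.pyGetD rating i 0 <;>
      simp [List.foldl_cons, List.map_cons, h1, h2, ih] <;> omega

-- B's if/elif pair counter, same value
theorem pvPairFoldB (rating : List Int) (x : Int) : ∀ (r : List Int) (l m : Int),
    r.foldl (fun (p : Int × Int) i =>
      if PySem.List.pyGetD rating i 0 < x then (p.1 + 1, p.2)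
      else if PySem.List.pyGetD rating i 0 > x then (p.1, p.2 + 1)
      else p) (l, m)
    = (l + ((r.map (fun i => PySem.List.pyGetD rating i 0)).countP (fun y => decide (y < x)) : Int),
       m + ((r.map (fun i => PySem.List.pyGetD rating i 0)).countP (fun y => decide (x < y)) : Int)) := by
  intro r
  induction r with
  | nil => intro l m; simp
  | cons i t ih =>
    intro l m
    by_cases h1 : PySem.List.pyGetD rating i 0 < x <;>
      by_cases h2 : x < PySem.List.pyGetD rating i 0 <;>
      simp [List.foldl_cons, List.map_cons, h1, h2, ih] <;> omega

-- B's accumulate-a-constant-per-match loop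
theorem pvAddFold (rating : List Int) (x a d : Int) : ∀ (r : List Int) (t : Int),
    r.foldl (fun t k =>
      if x < PySem.List.pyGetD rating k 0 then t + a
      else if x > PySem.List.pyGetD rating k 0 then t + d
      else t) t
    = t + a * ((r.map (fun k => PySem.List.pyGetD rating k 0)).countP (fun y => decide (x < y)) : Int)
        + d * ((r.map (fun k => PySem.List.pyGetD rating k 0)).countP (fun y => decide (y < x)) : Int) := by
  intro r
  induction r with
  | nil => intro t; simp
  | cons k ts ih =>
    intro t
    by_cases h1 : x < PySem.List.pyGetD rating k 0 <;>
      by_cases h2 : PySem.List.pyGetD rating k 0 < x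
    · exact absurd h2 (lt_asymm h1)
    · simp [List.foldl_cons, h1, h2, ih]
      try ring
    · simp [List.foldl_cons, h1, h2, ih]
      try ring
    · simp [List.foldl_cons, h1, h2, ih]
      try ring

theorem pvA_eq_sum (rating : List Int) :
    numTeams rating
    = ((PySem.List.pyRange 1 (PySem.List.len rating - 1) 1).map (pvF rating)).sum := by
  unfold numTeams
  rw [PySem.List.foldl_congr_mem
      (g := fun (count : Int) j => count + pvF rating j)
      (h := by
        intro acc j _
        simp only [pvPairFoldA rating (PySem.List.pyGetD rating j 0)]
        simp only [pvF]
        ring)]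
  rw [PySem.List.foldl_add]
  simp

theorem pvB_eq_sum (rating : List Int) :
    numTeams_alt rating
    = ((PySem.List.pyRange 0 (PySem.List.len rating) 1).map (pvF rating)).sum := by
  unfold numTeams_alt
  simp only [PySem.List.foldl_append_singleton_eq_map, List.nil_append]
  rw [PySem.List.foldl_congr_mem
      (g := fun (total : Int) j => total + pvF rating j)
      (h := by
        intro acc j hj
        have hj' := (PySem.List.mem_pyRange_one).mp hj
        simp only [PySem.List.pyGetD_map_pyRange_of_nonneg _ _ _ _ hj'.1 hj'.2]
        simp only [pvPairFoldB rating (PySem.List.pyGetD rating j 0)]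
        simp only [pvAddFold rating (PySem.List.pyGetD rating j 0)]
        simp only [pvF]
        ring)]
  rw [PySem.List.foldl_add]
  simp

theorem pvF_zero (rating : List Int) : pvF rating 0 = 0 := by
  simp [pvF, PySem.List.pyRange_one_eq_nil (by omega : (0:Int) ≤ 0)]

theorem pvF_last (rating : List Int) : pvF rating ((rating.length : Int) - 1) = 0 := by
  simp [pvF]

theorem pvRange01 : PySem.List.pyRange 0 1 1 = [0] := by
  rw [PySem.List.pyRange_one_cons (by omega), PySem.List.pyRange_one_eq_nil (by omega)]

-- ===== VERDICT (by name: the statement is the Claim_ definition above) =====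
theorem numTeams_spec : Claim_equal_numTeams := by
  intro rating _
  unfold Spec_numTeams
  rw [pvA_eq_sum, pvB_eq_sum]
  simp only [PySem.List.len_eq]
  by_cases hn : 2 ≤ (rating.length : Int)
  · have hl : PySem.List.pyRange ((rating.length : Int) - 1) (rating.length : Int) 1
        = [(rating.length : Int) - 1] := by
      rw [PySem.List.pyRange_one_cons (by omega), PySem.List.pyRange_one_eq_nil (by omega)]
    rw [PySem.List.pyRange_one_append 0 1 (rating.length : Int) (by omega) (by omega),
        PySem.List.pyRange_one_append 1 ((rating.length : Int) - 1) (rating.length : Int)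
          (by omega) (by omega),
        pvRange01, hl]
    simp [pvF_zero, pvF_last]
  · rw [PySem.List.pyRange_one_eq_nil (by omega : (rating.length : Int) - 1 ≤ 1)]
    by_cases h1 : (rating.length : Int) = 1
    · rw [h1, pvRange01]
      simp [pvF_zero]
    · rw [PySem.List.pyRange_one_eq_nil (by omega : (rating.length : Int) ≤ 0)]
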